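-- pv_equiv track=rewrite | github.com/cybsbbb/codeforces_practice | contests/Education150/C_ans.py | evaluate
-- ===== SOURCE A (Python) =====
-- def id(c):
--     return ord(c) - ord('A')
--
-- def evaluate(s):
--     res = 0
--     max_id = -1
--     for x in s[::-1]:
--         i = id(x)
--         if max_id > i:
--             res -= 10 ** i
--         else:
--             res += 10 ** i
--         max_id = max(max_id, i)
--     return res
-- ===== SOURCE B (Python) =====
-- def evaluate(s):
--     ids = [ord(c) - ord('A') for c in s]
--     total = 0
--     for j, v in enumerate(ids):
--         if any(w > v for w in ids[j + 1:]):
--             total -= 10 ** v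
--         else:
--             total += 10 ** v
--     return total
-- ===== Notes on version B (the rewrite author's own statement) =====
-- stated objective: simpler
-- what changed: B drops A's reverse scan with a fused running max entirely: for each position it directly tests whether any strictly larger letter occurs in the remaining suffix slice (a per-position existential scan, quadratic), instead of A's single right-to-left pass threading a running maximum and the accumulator together.
-- outside the precondition, e.g. on evaluate('@'): A returns 0.1, B returns 0.1; on evaluate(' 7 '): A returns -1e-10, B returns 1e-10
import Mathlib
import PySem

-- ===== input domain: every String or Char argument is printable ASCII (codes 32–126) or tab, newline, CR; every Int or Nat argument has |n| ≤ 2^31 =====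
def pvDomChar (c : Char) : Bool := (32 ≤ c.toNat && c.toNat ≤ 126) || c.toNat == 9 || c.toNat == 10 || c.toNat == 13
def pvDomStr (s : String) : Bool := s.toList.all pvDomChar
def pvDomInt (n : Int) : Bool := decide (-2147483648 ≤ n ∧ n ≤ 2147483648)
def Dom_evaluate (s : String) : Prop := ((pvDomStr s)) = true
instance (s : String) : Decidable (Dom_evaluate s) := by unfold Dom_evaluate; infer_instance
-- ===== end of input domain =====

-- B replaces A's fused reverse running-max scan by a per-position existential test on the
-- remaining suffix slice (objective: simpler; quadratic, not faster).


-- ===== PORT A =====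
-- A: reverse scan with running max; 10 ** i ported as (10:Int) ^ i.toNat, exact for i ≥ 0
-- (Pre_ keeps every character code at least 65, so every exponent is nonnegative).
def evaluate (s : String) : Int :=
  (s.toList.reverse.foldl
    (fun (st : Int × Int) x =>
      let i : Int := (x.toNat : Int) - 65
      ((if st.2 > i then st.1 - (10:Int) ^ i.toNat else st.1 + (10:Int) ^ i.toNat), max st.2 i))
    (0, -1)).1

-- ===== PORT B =====
-- B: for each (j, v) of enumerate(ids), test any(w > v for w in ids[j+1:]) on the slice.
def evaluate_alt (s : String) : Int :=
  let ids := s.toList.map (fun c => (c.toNat : Int) - 65)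
  (PySem.List.enumerate ids 0).foldl
    (fun tot p =>
      if (PySem.List.slice ids (some (p.1 + 1)) none).any (fun w => w > p.2)
      then tot - (10:Int) ^ p.2.toNat
      else tot + (10:Int) ^ p.2.toNat)
    0

-- ===== PRECONDITION & SPEC =====
-- Pre_ excludes strings containing a character with code below 65: there Python's 10 ** (negative)
-- is a float, so A does not return a value of the declared type int.
def Pre_evaluate (s : String) : Prop := (s.toList.all (fun c => 65 ≤ c.toNat)) = true
instance (s : String) : Decidable (Pre_evaluate s) := by unfold Pre_evaluate; infer_instance
def pvWitness_evaluate : String := "ABBA"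

def Spec_evaluate (s : String) (out : Int) : Prop := out = evaluate_alt s
instance (s : String) (out : Int) : Decidable (Spec_evaluate s out) := by unfold Spec_evaluate; infer_instance

-- ===== CLAIM (what is proved, stated in full; the proofs are below) =====
def Claim_equal_evaluate : Prop := ∀ (s : String), Dom_evaluate s → Pre_evaluate s → Spec_evaluate s (evaluate s)

-- ===== LEMMAS AND PROOFS =====

-- the common signed sum: sign of each element decided by the elements after it
def gSum : List Int → Int
  | [] => 0
  | i :: t => (if t.any (fun w => w > i) then -((10:Int) ^ i.toNat) else (10:Int) ^ i.toNat) + gSum t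

-- running max of a list, seeded with -1, folded the way A's scan builds it
def runMax (t : List Int) : Int := t.foldr (fun x m => max m x) (-1)

-- for i ≥ -1, 'running max of t exceeds i' is 'some element of t exceeds i'
lemma runMax_gt_iff (t : List Int) (i : Int) (hi : -1 ≤ i) :
    runMax t > i ↔ ∃ w ∈ t, w > i := by
  induction t with
  | nil => simp [runMax]; omega
  | cons x t ih =>
    simp only [runMax, List.foldr_cons]
    rw [gt_iff_lt, lt_max_iff]
    constructor
    · rintro (h | h)
      · obtain ⟨w, hw, hwi⟩ := ih.mp h
        exact ⟨w, List.mem_cons_of_mem _ hw, hwi⟩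
      · exact ⟨x, List.mem_cons_self .., h⟩
    · rintro ⟨w, hw, hwi⟩
      rcases List.mem_cons.mp hw with rfl | hw'
      · right; exact hwi
      · left; exact ih.mpr ⟨w, hw', hwi⟩

-- A's scan, as a foldr, computes (gSum ids, runMax ids) when all elements are ≥ 0
lemma foldA_eq (ids : List Int) (h : ∀ x ∈ ids, (0:Int) ≤ x) :
    ids.foldr
      (fun i (st : Int × Int) =>
        ((if st.2 > i then st.1 - (10:Int) ^ i.toNat else st.1 + (10:Int) ^ i.toNat), max st.2 i))
      (0, -1)
    = (gSum ids, runMax ids) := by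
  induction ids with
  | nil => simp [gSum, runMax]
  | cons i t ih =>
    have ht : ∀ x ∈ t, (0:Int) ≤ x := fun x hx => h x (List.mem_cons_of_mem _ hx)
    have hi : (0:Int) ≤ i := h i (List.mem_cons_self ..)
    rw [List.foldr_cons, ih ht]
    have hcond : (runMax t > i) ↔ ((t.any fun w => w > i) = true) := by
      rw [runMax_gt_iff t i (by omega)]
      simp [List.any_eq_true]
    simp only [gSum]
    by_cases hc : ((t.any fun w => w > i) = true)
    · rw [if_pos (hcond.mpr hc), if_pos hc]
      exact congrArg₂ Prod.mk (by ring) rfl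
    · rw [if_neg (fun h' => hc (hcond.mp h')), if_neg hc]
      exact congrArg₂ Prod.mk (by ring) rfl

-- B's loop over enumerate, with the slice resolved against the full list, equals gSum
lemma foldB_eq (ids : List Int) : ∀ (t : List Int) (k : Nat) (acc : Int),
    ids.drop k = t →
    (PySem.List.enumerate t (k : Int)).foldl
      (fun tot p =>
        if (PySem.List.slice ids (some (p.1 + 1)) none).any (fun w => w > p.2)
        then tot - (10:Int) ^ p.2.toNat
        else tot + (10:Int) ^ p.2.toNat)
      acc = acc + gSum t := by
  intro t
  induction t with
  | nil => intro k acc _; simp [PySem.List.enumerate_nil, gSum]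
  | cons i t ih =>
    intro k acc hk
    have hdrop : ids.drop (k + 1) = t := by
      have h1 := congrArg (List.drop 1) hk
      simpa [List.drop_drop, Nat.add_comm] using h1
    have hslice : PySem.List.slice ids (some ((k:Int) + 1)) none = t := by
      have hcast : ((k:Int) + 1) = ((k + 1 : Nat) : Int) := by push_cast; ring
      rw [hcast, PySem.List.slice_from_natCast, hdrop]
    rw [PySem.List.enumerate_cons, List.foldl_cons]
    simp only [hslice]
    have hcast : ((k:Int) + 1) = ((k + 1 : Nat) : Int) := by push_cast; ring
    rw [hcast, ih (k + 1) _ hdrop]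
    by_cases hc : ((t.any fun w => w > i) = true)
    · rw [if_pos hc]; simp [gSum, hc]; ring
    · rw [if_neg hc]; simp [gSum, hc]; ring

-- ===== VERDICT (by name: the statement is the Claim_ definition above) =====
theorem evaluate_spec : Claim_equal_evaluate := by
  intro s _ hpre
  show evaluate s = evaluate_alt s
  unfold evaluate evaluate_alt
  set ids := s.toList.map (fun c => (c.toNat : Int) - 65) with hids
  have hnn : ∀ x ∈ ids, (0:Int) ≤ x := by
    intro x hx
    rw [hids] at hx
    rcases List.mem_map.mp hx with ⟨c, hc, rfl⟩
    have := (List.all_eq_true.mp hpre) c hc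
    simp at this
    omega
  have hB := foldB_eq ids ids 0 0 (by simp)
  simp only [Nat.cast_zero] at hB
  rw [hB, zero_add]
  rw [List.foldl_reverse]
  have hmap :
      s.toList.foldr
        (fun x (st : Int × Int) =>
          let i : Int := (x.toNat : Int) - 65
          ((if st.2 > i then st.1 - (10:Int) ^ i.toNat else st.1 + (10:Int) ^ i.toNat), max st.2 i))
        (0, -1)
      = ids.foldr
        (fun i (st : Int × Int) =>
          ((if st.2 > i then st.1 - (10:Int) ^ i.toNat else st.1 + (10:Int) ^ i.toNat), max st.2 i))
        (0, -1) := by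
    rw [hids, List.foldr_map]
  rw [hmap, foldA_eq ids hnn]
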